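-- pv_equiv track=rewrite | github.com/alexamenta/dog | view.py | move_vector
-- ===== SOURCE A (Python) =====
-- def move_vector(move_string):
--     "Given a move string, calculate the move vector"
--     vector_dict = {'W': (-1,0),
--                    'E': (1,0),
--                    'N': (0,1),
--                    'S': (0,-1)}
--
--     move_vector_x = 0
--     move_vector_y = 0
--
--     for char in move_string:
--         move_vector_x += vector_dict[char][0]
--         move_vector_y += vector_dict[char][1]
--
--     return (move_vector_x, move_vector_y)
-- ===== SOURCE B (Python) =====
-- def move_vector(move_string):
--     "Given a move string, calculate the move vector"
--     return (move_string.count('E') - move_string.count('W'),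
--             move_string.count('N') - move_string.count('S'))
-- ===== Notes on version B (the rewrite author's own statement) =====
-- stated objective: simpler
-- what changed: Replaces the per-character accumulation loop with four str.count calls: x = #E - #W, y = #N - #S, a closed-form weighted count instead of a running sum.
-- outside the precondition, e.g. on move_vector('EEX'): A raises KeyError, B returns (2, 0)
import Mathlib
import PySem

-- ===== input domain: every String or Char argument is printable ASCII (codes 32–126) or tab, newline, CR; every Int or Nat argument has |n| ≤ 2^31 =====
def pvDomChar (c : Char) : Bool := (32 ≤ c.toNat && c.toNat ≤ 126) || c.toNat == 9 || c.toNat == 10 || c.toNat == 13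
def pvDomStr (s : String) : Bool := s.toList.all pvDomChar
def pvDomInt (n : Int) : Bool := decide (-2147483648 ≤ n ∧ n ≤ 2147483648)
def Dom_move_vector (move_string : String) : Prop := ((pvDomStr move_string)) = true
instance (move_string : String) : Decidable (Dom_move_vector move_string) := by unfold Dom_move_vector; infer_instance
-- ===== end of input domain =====

-- B replaces A's per-character accumulation loop with four character counts (x = #E - #W, y = #N - #S); objective: simpler.

-- ===== PORT A =====
def pvVectorDict : PySem.Dict Char (Int × Int) :=
  PySem.Dict.ofList [('W', (-1, 0)), ('E', (1, 0)), ('N', (0, 1)), ('S', (0, -1))]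

def move_vector (move_string : String) : Int × Int :=
  move_string.toList.foldl
    (fun (acc : Int × Int) c =>
      match pvVectorDict.get? c with
      | some v => (acc.1 + v.1, acc.2 + v.2)
      | none => acc)   -- Python raises KeyError here; such inputs are excluded by Pre_move_vector
    (0, 0)

-- ===== PORT B =====
def move_vector_alt (move_string : String) : Int × Int :=
  ((PySem.Str.count move_string "E" : Int) - (PySem.Str.count move_string "W" : Int),
   (PySem.Str.count move_string "N" : Int) - (PySem.Str.count move_string "S" : Int))

-- ===== PRECONDITION & SPEC =====
-- Pre_ excludes exactly the strings containing a character other than W, E, N or S, on which A raises KeyError.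
def Pre_move_vector (move_string : String) : Prop :=
  move_string.toList.all (fun c => c == 'W' || c == 'E' || c == 'N' || c == 'S') = true
instance (move_string : String) : Decidable (Pre_move_vector move_string) := by
  unfold Pre_move_vector; infer_instance

def pvWitness_move_vector : String := "NNEESW"

def Spec_move_vector (move_string : String) (out : Int × Int) : Prop := out = move_vector_alt move_string
instance (move_string : String) (out : Int × Int) : Decidable (Spec_move_vector move_string out) := by unfold Spec_move_vector; infer_instance

-- ===== CLAIM (what is proved, stated in full; the proofs are below) =====
def Claim_equal_move_vector : Prop := ∀ (move_string : String), Dom_move_vector move_string → Pre_move_vector move_string → Spec_move_vector move_string (move_vector move_string)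

-- ===== LEMMAS AND PROOFS =====

-- scan loop of Chars.count for a single-character pattern
theorem go_singleton (c : Char) (l : List Char) (acc : Nat) :
    PySem.Chars.count.go [c] l.length l acc = acc + l.count c := by
  induction l generalizing acc with
  | nil => simp [PySem.Chars.count.go]
  | cons h t ih =>
    simp only [List.length_cons, PySem.Chars.count.go, List.isPrefixOf]
    by_cases hch : c == h
    · have : h = c := (beq_iff_eq.mp hch).symm
      simp [List.drop, ih, this]
      omega
    · have : ¬ h = c := fun e => hch (beq_iff_eq.mpr e.symm)
      simp [hch, ih, this]

-- single-character substring count is character count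
theorem chars_count_singleton (l : List Char) (c : Char) :
    PySem.Chars.count l [c] = l.count c := by
  simp [PySem.Chars.count, go_singleton]

-- A's loop, characterised on WENS-only strings
theorem foldl_wens (l : List Char) (h : ∀ c ∈ l, c ∈ ['W', 'E', 'N', 'S']) (x y : Int) :
    l.foldl
      (fun (acc : Int × Int) c =>
        match pvVectorDict.get? c with
        | some v => (acc.1 + v.1, acc.2 + v.2)
        | none => acc)
      (x, y)
    = (x + (l.count 'E' : Int) - (l.count 'W' : Int),
       y + (l.count 'N' : Int) - (l.count 'S' : Int)) := by
  induction l generalizing x y with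
  | nil => simp
  | cons hd t ih =>
    have hmem := h hd (List.mem_cons_self ..)
    have ht : ∀ c ∈ t, c ∈ ['W', 'E', 'N', 'S'] := fun c hc => h c (List.mem_cons_of_mem _ hc)
    have gW : pvVectorDict.get? 'W' = some (-1, 0) := by decide
    have gE : pvVectorDict.get? 'E' = some (1, 0) := by decide
    have gN : pvVectorDict.get? 'N' = some (0, 1) := by decide
    have gS : pvVectorDict.get? 'S' = some (0, -1) := by decide
    fin_cases hmem <;>
      simp only [List.foldl_cons, gW, gE, gN, gS, ih ht, List.count_cons, Prod.mk.injEq] <;>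
      constructor <;> simp <;> ring

-- ===== VERDICT (by name: the statement is the Claim_ definition above) =====
theorem move_vector_spec : Claim_equal_move_vector := by
  intro s _ hpre
  unfold Pre_move_vector at hpre
  have hpre' : ∀ c ∈ s.toList, c ∈ ['W', 'E', 'N', 'S'] := by
    intro c hc
    have := List.all_eq_true.mp hpre c hc
    simp at this
    simp only [List.mem_cons]
    tauto
  unfold Spec_move_vector move_vector move_vector_alt
  rw [foldl_wens s.toList hpre' 0 0]
  simp [PySem.Str.count, chars_count_singleton]
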